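-- pv_equiv track=rewrite | github.com/TonyKerguen/Python-1A | TP9/2_matrices/API_matrice1.py | get_diagonale_principale
-- ===== SOURCE A (Python) =====
-- def get_nb_colonnes(matrice):
--     """permet de connaître le nombre de colonnes d'une matrice
--
--     Args:
--         matrice : une matrice
--
--     Returns:
--         int : le nombre de colonnes de la matrice
--     """
--     return matrice[1]
--
-- def get_val(matrice, ligne, colonne):
--     """permet de connaître la valeur de l'élément de la matrice dont on connaît
--     le numéro de ligne et le numéro de colonne.
--
--     Args:
--         matrice : une matrice
--         ligne (int) : le numéro d'une ligne (la numérotation commence à zéro)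
--         colonne (int) : le numéro d'une colonne (la numérotation commence à zéro)
--
--     Returns:
--         la valeur qui est dans la case située à la ligne et la colonne spécifiées
--     """
--     return matrice[2][ligne*get_nb_colonnes(matrice)+colonne]
--
-- def get_diagonale_principale(matrice):
--     res = []
--     if matrice[0] == matrice[1]:
--         for elem in range(0,matrice[0]):
--             res.append(get_val(matrice, elem, elem))
--         return res
--     else:
--         return None
-- ===== SOURCE B (Python) =====
-- def get_diagonale_principale(matrice):
--     n = matrice[0]
--     if n != matrice[1]:
--         return None
--     if n <= 0:
--         return []
--     return matrice[2][:n * n:n + 1]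
-- ===== Notes on version B (the rewrite author's own statement) =====
-- stated objective: idiomatic
-- what changed: Replaces the explicit index loop building i*cols+i and appending per element with a single strided slice data[:n*n:n+1] of the flat storage (plus a natural empty result for non-positive n).
import Mathlib
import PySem

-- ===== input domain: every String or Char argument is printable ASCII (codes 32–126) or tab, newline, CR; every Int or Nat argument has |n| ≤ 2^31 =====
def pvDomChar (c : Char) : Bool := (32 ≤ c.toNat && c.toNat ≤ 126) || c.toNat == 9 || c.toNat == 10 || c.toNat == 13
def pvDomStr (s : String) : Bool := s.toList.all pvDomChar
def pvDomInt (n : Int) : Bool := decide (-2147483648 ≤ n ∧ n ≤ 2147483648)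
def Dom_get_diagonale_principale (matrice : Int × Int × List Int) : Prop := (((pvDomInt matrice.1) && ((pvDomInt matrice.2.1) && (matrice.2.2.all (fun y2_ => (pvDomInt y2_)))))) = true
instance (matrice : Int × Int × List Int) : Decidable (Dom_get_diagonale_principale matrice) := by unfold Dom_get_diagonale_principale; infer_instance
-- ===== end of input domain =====

-- B extracts the diagonal with one strided slice of the flat storage instead of A's per-index loop; same values everywhere A returns.

-- ===== PORT A =====
def get_nb_colonnes (matrice : Int × Int × List Int) : Int := matrice.2.1

def get_val (matrice : Int × Int × List Int) (ligne colonne : Int) : Option Int :=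
  PySem.List.pyGet? matrice.2.2 (ligne * get_nb_colonnes matrice + colonne)

def get_diagonale_principale (matrice : Int × Int × List Int) : Option (List Int) :=
  if matrice.1 = matrice.2.1 then
    (PySem.List.pyRange 0 matrice.1 1).foldl
      (fun acc elem => acc.bind fun res => (get_val matrice elem elem).map fun v => res ++ [v])
      (some [])
  else none

-- ===== PORT B =====
def get_diagonale_principale_alt (matrice : Int × Int × List Int) : Option (List Int) :=
  let n := matrice.1
  if n ≠ matrice.2.1 then none
  else if n ≤ 0 then some []
  else PySem.List.slice? matrice.2.2 none (some (n * n)) (n + 1)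

-- ===== PRECONDITION & SPEC =====
-- Pre_ excludes exactly the inputs where A raises IndexError: a square matrix with
-- positive declared size whose flat storage is shorter than n*n.
def Pre_get_diagonale_principale (matrice : Int × Int × List Int) : Prop :=
  (matrice.1 = matrice.2.1 ∧ 0 < matrice.1) → matrice.1 * matrice.1 ≤ (matrice.2.2.length : Int)
instance (matrice : Int × Int × List Int) : Decidable (Pre_get_diagonale_principale matrice) := by unfold Pre_get_diagonale_principale; infer_instance

def pvWitness_get_diagonale_principale : (Int × Int × List Int) := (2, 2, [1, 2, 3, 4])

def Spec_get_diagonale_principale (matrice : Int × Int × List Int) (out : Option (List Int)) : Prop := out = get_diagonale_principale_alt matrice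
instance (matrice : Int × Int × List Int) (out : Option (List Int)) : Decidable (Spec_get_diagonale_principale matrice out) := by unfold Spec_get_diagonale_principale; infer_instance

-- ===== CLAIM (what is proved, stated in full; the proofs are below) =====
def Claim_equal_get_diagonale_principale : Prop := ∀ (matrice : Int × Int × List Int), Dom_get_diagonale_principale matrice → Pre_get_diagonale_principale matrice → Spec_get_diagonale_principale matrice (get_diagonale_principale matrice)

-- ===== LEMMAS AND PROOFS =====

-- A's append loop over indices whose lookups all succeed is a filterMap.
lemma foldl_bind_append (g : Int → Option Int) (l : List Int) (res : List Int)
    (h : ∀ i ∈ l, (g i).isSome) :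
    l.foldl (fun acc e => acc.bind fun r => (g e).map fun v => r ++ [v]) (some res)
      = some (res ++ l.filterMap g) := by
  induction l generalizing res with
  | nil => simp
  | cons i l ih =>
    obtain ⟨v, hv⟩ := Option.isSome_iff_exists.mp (h i (by simp))
    simp only [List.foldl_cons, Option.bind_some, hv, Option.map_some]
    rw [ih (res ++ [v]) (fun j hj => h j (by simp [hj]))]
    simp [hv]

-- Main case: square with positive size and long-enough storage.
lemma main_case (n : Int) (data : List Int) (hn : 0 < n) (hlen : n * n ≤ (data.length : Int)) :
    (PySem.List.pyRange 0 n 1).foldl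
      (fun acc elem => acc.bind fun res =>
        (PySem.List.pyGet? data (elem * n + elem)).map fun v => res ++ [v])
      (some []) = PySem.List.slice? data none (some (n * n)) (n + 1) := by
  -- B side: unfold the slice into its filterMap normal form.
  have hstep : (n + 1) ≠ 0 := by omega
  have hcount : ((n * n - 0 + (n + 1) - 1) / (n + 1)).toNat = n.toNat := by
    have : n * n - 0 + (n + 1) - 1 = n * (n + 1) := by ring
    rw [this, Int.mul_ediv_cancel _ hstep]
  rw [PySem.List.slice?]
  simp only [PySem.List.sliceIndices, if_neg hstep]
  have hnotneg : ¬ (n + 1 < 0) := by omega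
  have hnn : ¬ (n * n < 0) := by nlinarith
  -- clamp the stop bound
  have hstop : min (n * n) (data.length : Int) = n * n := min_eq_left hlen
  simp only [hnotneg, if_false, hnn]
  rw [hstop]
  have h1 : (0:Int) < n + 1 := by omega
  have h2 : (0:Int) < n * n := mul_pos hn hn
  simp only [if_pos h1, if_pos h2, hcount]
  have key : ∀ i : Int, 0 ≤ i → i < n →
      PySem.List.pyGet? data (i * n + i) = data[(i * n + i).toNat]? ∧
        (i * n + i).toNat < data.length := by
    intro i h0 hi
    have hnn0 : 0 ≤ i * n + i := by nlinarith
    have hub : i * n + i < (data.length : Int) := by nlinarith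
    constructor
    · rw [← Int.toNat_of_nonneg hnn0, PySem.List.pyGet?_natCast]
      congr 1
    · omega
  have hmem : ∀ i ∈ PySem.List.pyRange 0 n 1,
      (PySem.List.pyGet? data (i * n + i)).isSome := by
    intro i hi
    obtain ⟨h0, hlt⟩ := (PySem.List.mem_pyRange_one).mp hi
    obtain ⟨heq, hb⟩ := key i h0 hlt
    rw [heq]
    simpa using hb
  rw [foldl_bind_append _ _ [] hmem, PySem.List.pyRange_one]
  simp only [List.nil_append, List.filterMap_map, Int.sub_zero]
  refine congrArg some (List.filterMap_congr ?_)
  intro k hk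
  have hk' : (k : Int) < n := by
    have := List.mem_range.mp hk
    omega
  obtain ⟨heq, -⟩ := key k (Int.natCast_nonneg k) hk'
  have harith : (0 + (n + 1) * (k : Int)) = (k : Int) * n + k := by ring
  simp only [Function.comp, zero_add, heq, harith]

-- ===== VERDICT (by name: the statement is the Claim_ definition above) =====
theorem get_diagonale_principale_spec : Claim_equal_get_diagonale_principale := by
  intro matrice _ hpre
  obtain ⟨n, m, data⟩ := matrice
  unfold Spec_get_diagonale_principale get_diagonale_principale get_diagonale_principale_alt
  by_cases hnm : n = m
  · subst hnm
    simp only [ne_eq, not_true_eq_false, if_false, reduceIte]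
    by_cases hle : n ≤ 0
    · rw [PySem.List.pyRange_one_eq_nil hle]
      simp [hle]
    · have hlen : n * n ≤ (data.length : Int) := hpre ⟨rfl, by omega⟩
      simp only [if_neg hle]
      simpa [get_val, get_nb_colonnes] using main_case n data (by omega) hlen
  · simp [hnm]
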